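-- pv_equiv track=rewrite | github.com/victorchen01/lab7_300116813 | basics-2Dlists-todo.py | index_of_max_sum_row
-- ===== SOURCE A (Python) =====
-- def index_of_max_sum_row(m):
--      '''(2D list)->int
--      Returns the index of a row that has the largest sum of all the rows
--      Precondition: m is a matrix filled with numbers
--      >>> index_of_max_sum_row([[100,100], [-100,0], [200,30], [1,2]])
--      2
--      >>> index_of_max_sum_row([[100,100], [-100,0], [200,30], [10000,2]])
--      3
--      '''
--
--      sumsR = []
--
--      for i in range(len(m)):
--          rowSum = 0
--          for j in range(len(m[i])):
--              rowSum += m[i][j]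
--          sumsR.append(rowSum)
--
--      maxSums = sumsR[0]
--
--      for i in range(len(sumsR)):
--          if(sumsR[i] > maxSums):
--              maxSums = sumsR[i]
--
--      return sumsR.index(maxSums)
-- ===== SOURCE B (Python) =====
-- def index_of_max_sum_row(m):
--     best_idx = 0
--     best_sum = sum(m[0])
--     for i in range(1, len(m)):
--         s = sum(m[i])
--         if s > best_sum:
--             best_sum = s
--             best_idx = i
--     return best_idx
-- ===== Notes on version B (the rewrite author's own statement) =====
-- stated objective: faster
-- what changed: Replaced A's three passes (build a sums list, scan it for the max, then list.index to find it again) by one streaming pass that keeps the best index and best sum, updating only on a strict improvement to preserve first-of-ties.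
import Mathlib
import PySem

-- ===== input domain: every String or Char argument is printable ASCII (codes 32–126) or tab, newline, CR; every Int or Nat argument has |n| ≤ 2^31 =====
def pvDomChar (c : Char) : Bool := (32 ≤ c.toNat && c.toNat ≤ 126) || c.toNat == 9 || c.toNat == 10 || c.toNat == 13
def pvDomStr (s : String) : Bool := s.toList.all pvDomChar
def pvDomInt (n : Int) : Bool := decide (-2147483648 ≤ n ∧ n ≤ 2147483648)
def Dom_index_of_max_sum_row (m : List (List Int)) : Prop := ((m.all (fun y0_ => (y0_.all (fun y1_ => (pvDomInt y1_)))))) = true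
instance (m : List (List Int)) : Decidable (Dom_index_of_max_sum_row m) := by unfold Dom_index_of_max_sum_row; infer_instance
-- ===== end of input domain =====

-- B replaces A's three passes (sums list, max scan, list.index) by one streaming
-- pass keeping the best index and best sum (strict '>' keeps the first maximal row).

-- ===== PORT A =====
-- inner loop 'for j in range(len(m[i])): rowSum += m[i][j]' — a fold over the row's elements
def aRowSum (row : List Int) : Int := row.foldl (fun s x => s + x) 0

def index_of_max_sum_row (m : List (List Int)) : Int :=
  -- for i in range(len(m)): sumsR.append(rowSum)
  let sumsR := m.foldl (fun acc row => acc ++ [aRowSum row]) []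
  -- maxSums = sumsR[0]  (Python raises IndexError when m == []; excluded by Pre_)
  let maxSums0 := sumsR.headD 0
  -- for i in range(len(sumsR)): if sumsR[i] > maxSums: maxSums = sumsR[i]
  let maxSums := sumsR.foldl (fun mx v => if v > mx then v else mx) maxSums0
  -- return sumsR.index(maxSums)  (the max is always present, so no ValueError)
  (((PySem.List.index? sumsR maxSums).getD 0 : Nat) : Int)

-- ===== PORT B =====
-- sum(row)
def bSum (row : List Int) : Int := row.foldl (fun s x => s + x) 0

-- for i in range(1, len(m)): s = sum(m[i]); if s > best_sum: best_sum, best_idx = s, i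
def bLoop (rest : List (List Int)) (i bi bs : Int) : Int :=
  match rest with
  | [] => bi
  | row :: rest' =>
    let s := bSum row
    if s > bs then bLoop rest' (i + 1) i s else bLoop rest' (i + 1) bi bs

def index_of_max_sum_row_alt (m : List (List Int)) : Int :=
  match m with
  | [] => 0   -- Python B raises IndexError here (sum(m[0])); outside Pre_
  | r0 :: rest => bLoop rest 1 0 (bSum r0)

-- ===== PRECONDITION & SPEC =====
-- Pre_ excludes only the empty matrix, on which A raises IndexError at sumsR[0].
def Pre_index_of_max_sum_row (m : List (List Int)) : Prop := m ≠ []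
instance (m : List (List Int)) : Decidable (Pre_index_of_max_sum_row m) := by
  unfold Pre_index_of_max_sum_row; infer_instance

def pvWitness_index_of_max_sum_row : List (List Int) := [[1, 2], [3]]

def Spec_index_of_max_sum_row (m : List (List Int)) (out : Int) : Prop := out = index_of_max_sum_row_alt m
instance (m : List (List Int)) (out : Int) : Decidable (Spec_index_of_max_sum_row m out) := by unfold Spec_index_of_max_sum_row; infer_instance

-- ===== CLAIM (what is proved, stated in full; the proofs are below) =====
def Claim_equal_index_of_max_sum_row : Prop := ∀ (m : List (List Int)), Dom_index_of_max_sum_row m → Pre_index_of_max_sum_row m → Spec_index_of_max_sum_row m (index_of_max_sum_row m)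

-- ===== LEMMAS AND PROOFS =====

-- A's max-scan, as a fold
def fmax (bs : Int) (l : List Int) : Int :=
  l.foldl (fun mx v => if v > mx then v else mx) bs

theorem sums_build (l : List (List Int)) (acc : List Int) :
    l.foldl (fun acc row => acc ++ [aRowSum row]) acc = acc ++ l.map aRowSum := by
  induction l generalizing acc with
  | nil => simp
  | cons r t ih => simp [List.foldl, ih]

-- Loop invariant: pre = sums already seen, bs = their max, bi = first index of bs in pre.
theorem bLoop_invariant (ss : List (List Int)) (pre : List Int) (bs : Int) (bi : Nat)
    (hidx : PySem.List.index? pre bs = some bi) (hle : ∀ x ∈ pre, x ≤ bs) :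
    bLoop ss (pre.length : Int) (bi : Int) bs
      = (((PySem.List.index? (pre ++ ss.map bSum) (fmax bs (ss.map bSum))).getD 0 : Nat) : Int) := by
  induction ss generalizing pre bs bi with
  | nil =>
    rw [PySem.List.index?_eq_idxOf?] at hidx
    simp [bLoop, fmax, hidx]
  | cons row ss' ih =>
    by_cases h : bSum row > bs
    · have hnotmem' : bSum row ∉ pre := by
        intro hm
        exact absurd (hle _ hm) (not_le.mpr h)
      have hidx' : PySem.List.index? (pre ++ [bSum row]) (bSum row) = some pre.length :=
        PySem.List.index?_append_singleton_self _ _ hnotmem'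
      have hle' : ∀ x ∈ pre ++ [bSum row], x ≤ bSum row := by
        intro x hx
        rcases List.mem_append.mp hx with hx | hx
        · exact le_of_lt (lt_of_le_of_lt (hle _ hx) h)
        · simp at hx; omega
      have := ih (pre ++ [bSum row]) (bSum row) pre.length hidx' hle'
      simp only [List.length_append, List.length_cons, List.length_nil] at this
      push_cast at this
      simp only [bLoop, List.map_cons, fmax, List.foldl_cons, if_pos h] at *
      rw [show pre ++ bSum row :: List.map bSum ss' = (pre ++ [bSum row]) ++ List.map bSum ss' by simp]
      exact this
    · have hmem : bs ∈ pre := (PySem.List.index?_isSome_iff pre bs).mp (by rw [hidx]; rfl)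
      have hidx' : PySem.List.index? (pre ++ [bSum row]) bs = some bi := by
        rw [PySem.List.index?_append_of_mem _ hmem]; exact hidx
      have hle' : ∀ x ∈ pre ++ [bSum row], x ≤ bs := by
        intro x hx
        rcases List.mem_append.mp hx with hx | hx
        · exact hle _ hx
        · simp at hx; omega
      have := ih (pre ++ [bSum row]) bs bi hidx' hle'
      simp only [List.length_append, List.length_cons, List.length_nil] at this
      push_cast at this
      simp only [bLoop, List.map_cons, fmax, List.foldl_cons, if_neg h] at *
      rw [show pre ++ bSum row :: List.map bSum ss' = (pre ++ [bSum row]) ++ List.map bSum ss' by simp]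
      exact this

theorem aRowSum_eq_bSum : aRowSum = bSum := rfl

-- ===== VERDICT (by name: the statement is the Claim_ definition above) =====
theorem index_of_max_sum_row_spec : Claim_equal_index_of_max_sum_row := by
  intro m _hdom hpre
  unfold Spec_index_of_max_sum_row
  match m with
  | [] => exact absurd rfl hpre
  | r0 :: rest =>
    unfold index_of_max_sum_row index_of_max_sum_row_alt
    rw [sums_build, aRowSum_eq_bSum]
    simp only [List.nil_append, List.map_cons, List.headD_cons]
    have h := bLoop_invariant rest [bSum r0] (bSum r0) 0
      (PySem.List.index?_cons_self _ _) (by intro x hx; simp at hx; omega)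
    simp only [List.length_cons, List.length_nil, List.singleton_append] at h
    norm_num at h
    rw [PySem.List.index?_eq_idxOf?]
    have hfold : List.foldl (fun mx v => if v > mx then v else mx) (bSum r0)
        (bSum r0 :: List.map bSum rest) = fmax (bSum r0) (List.map bSum rest) := by
      simp [fmax, List.foldl_cons]
    rw [hfold, ← h]
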